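-- pv_equiv track=rewrite | github.com/iskandarumidov/CompetitiveProgramming | codeforces/contests/timur/twoPointers/B_balanced_team.py | solve
-- ===== SOURCE A (Python) =====
-- def solve(n, arr):
--   arr.sort()
--   res = 0
--   r = 0
--   for l in range(n):
--     # while r+1 < n and arr[r+1]-arr[l] <= 5:
--     while r < n and arr[r]-arr[l] <= 5:
--
--       r+=1
--     # res = max(res, r-l+1)
--     res = max(res, r-l)
--
--   return res
-- ===== SOURCE B (Python) =====
-- def solve(n, arr):
--     arr.sort()
--     res = 0
--     for l in range(n):
--         # binary search: first index in [l, n) whose value exceeds arr[l] + 5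
--         lo, hi = l, n
--         while lo < hi:
--             mid = (lo + hi) // 2
--             if arr[mid] <= arr[l] + 5:
--                 lo = mid + 1
--             else:
--                 hi = mid
--         if lo - l > res:
--             res = lo - l
--     return res
-- ===== Notes on version B (the rewrite author's own statement) =====
-- stated objective: alternative
-- what changed: Replaces A's shared monotone two-pointer r (whose inner while loop carries state across left endpoints) by an independent upper-bound binary search over the sorted prefix for each left endpoint.
import Mathlib
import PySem

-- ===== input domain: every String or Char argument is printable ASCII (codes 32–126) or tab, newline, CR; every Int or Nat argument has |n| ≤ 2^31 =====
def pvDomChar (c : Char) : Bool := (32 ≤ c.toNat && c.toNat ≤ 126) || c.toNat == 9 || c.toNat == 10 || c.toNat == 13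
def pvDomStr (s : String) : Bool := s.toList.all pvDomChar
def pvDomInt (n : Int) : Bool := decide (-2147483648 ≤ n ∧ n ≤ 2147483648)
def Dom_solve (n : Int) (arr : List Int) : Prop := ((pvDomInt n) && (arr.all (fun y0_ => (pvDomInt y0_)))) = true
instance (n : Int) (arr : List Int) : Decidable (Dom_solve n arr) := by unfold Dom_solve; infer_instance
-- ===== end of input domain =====

-- B replaces A's shared two-pointer state by an independent per-l count over the sorted
-- pfx (simpler decomposition, not faster). A sorts arr in place (B does too); the
-- equivalence proved here is about the RETURN value.

-- ===== PORT A =====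
-- the inner 'while r < n and arr[r]-arr[l] <= 5: r += 1'; pyGetD's default is never
-- used under Pre_solve (then 0 ≤ r < n ≤ len); where Python would raise IndexError the
-- input is excluded by Pre_solve.
def solveWhile (s : List Int) (n : Int) (al : Int) (r : Int) : Int :=
  if _h : r < n ∧ PySem.List.pyGetD s r 0 - al ≤ 5 then
    solveWhile s n al (r + 1)
  else r
termination_by (n - r).toNat
decreasing_by omega

def solve (n : Int) (arr : List Int) : Int :=
  let s := PySem.List.sorted arr (fun x => x) false
  (((PySem.List.pyRange 0 n 1).foldl (fun (st : Int × Int) l =>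
      let r' := solveWhile s n (PySem.List.pyGetD s l 0) st.2
      (max st.1 (r' - l), r')) (0, 0))).1

-- ===== PORT B =====
-- the inner 'while lo < hi' upper-bound binary search of B; arr[mid] is pyGetD (its
-- default is never used under Pre_solve, where l ≤ lo ≤ mid < hi ≤ n ≤ len)
def bsearch (s : List Int) (t lo hi : Int) : Int :=
  if _h : lo < hi then
    let mid := PySem.Int.floordiv (lo + hi) 2
    if PySem.List.pyGetD s mid 0 ≤ t then bsearch s t (mid + 1) hi
    else bsearch s t lo mid
  else lo
termination_by (hi - lo).toNat
decreasing_by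
  · have he : PySem.Int.floordiv (lo + hi) 2 = (lo + hi) / 2 :=
      PySem.Int.floordiv_eq_ediv_of_pos (by omega)
    omega
  · have he : PySem.Int.floordiv (lo + hi) 2 = (lo + hi) / 2 :=
      PySem.Int.floordiv_eq_ediv_of_pos (by omega)
    omega

def solve_alt (n : Int) (arr : List Int) : Int :=
  let s := PySem.List.sorted arr (fun x => x) false
  (PySem.List.pyRange 0 n 1).foldl (fun res l =>
    let lo := bsearch s (PySem.List.pyGetD s l 0 + 5) l n
    if lo - l > res then lo - l else res) 0

-- ===== PRECONDITION & SPEC =====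
-- A indexes arr[l] (and arr[r]) for l up to n-1, so it raises IndexError whenever
-- n > len(arr); exactly those inputs are excluded.
def Pre_solve (n : Int) (arr : List Int) : Prop := n ≤ (arr.length : Int)
instance (n : Int) (arr : List Int) : Decidable (Pre_solve n arr) := by unfold Pre_solve; infer_instance
def pvWitness_solve : Int × List Int := (3, [1, 9, 3])

def Spec_solve (n : Int) (arr : List Int) (out : Int) : Prop := out = solve_alt n arr
instance (n : Int) (arr : List Int) (out : Int) : Decidable (Spec_solve n arr out) := by unfold Spec_solve; infer_instance

-- ===== CLAIM (what is proved, stated in full; the proofs are below) =====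
def Claim_equal_solve : Prop := ∀ (n : Int) (arr : List Int), Dom_solve n arr → Pre_solve n arr → Spec_solve n arr (solve n arr)

-- ===== LEMMAS AND PROOFS =====

-- the count both loops converge to: |{i < |p| : p[i] ≤ s[l] + 5}| as an Int
def cntC (s p : List Int) (l : Int) : Int :=
  (p.countP (fun x => decide (x ≤ PySem.List.pyGetD s l 0 + 5)) : Int)

-- in a sorted list, the elements ≤ t are exactly the first countP-many
theorem countP_threshold (p : List Int) (hp : List.Pairwise (fun a b : Int => a ≤ b) p) (t : Int) :
    ∀ i (h : i < p.length), (p[i] ≤ t ↔ i < p.countP (fun x => decide (x ≤ t))) := by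
  induction p with
  | nil => intro i h; simp at h
  | cons x xs ih =>
    rw [List.pairwise_cons] at hp
    obtain ⟨hx, hxs⟩ := hp
    intro i h
    by_cases hxt : x ≤ t
    · have hc : (x :: xs).countP (fun x => decide (x ≤ t)) =
          xs.countP (fun x => decide (x ≤ t)) + 1 := by
        simp [hxt]
      cases i with
      | zero => simp [hxt, hc]
      | succ j =>
        have hj : j < xs.length := by simpa using h
        simp only [List.getElem_cons_succ, hc]
        rw [ih hxs j hj]
        omega
    · have hc : (x :: xs).countP (fun x => decide (x ≤ t)) = 0 := by
        rw [List.countP_eq_zero]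
        intro y hy
        simp only [decide_eq_true_eq]
        intro hyt
        rcases List.mem_cons.mp hy with h | h
        · exact hxt (h ▸ hyt)
        · exact hxt (le_trans (hx y h) hyt)
      rw [hc]
      cases i with
      | zero => simpa using hxt
      | succ j =>
        have hj : j < xs.length := by simpa using h
        simp only [List.getElem_cons_succ]
        constructor
        · intro hyt
          exact absurd (le_trans (hx _ (List.getElem_mem hj)) hyt) hxt
        · omega

-- A's inner while loop climbs exactly to the count c, given the interval facts about c
theorem while_eq (s : List Int) (n al c : Int)
    (hcn : c ≤ n)
    (hlo : ∀ r : Int, 0 ≤ r → r < c → PySem.List.pyGetD s r 0 - al ≤ 5)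
    (hhi : c < n → ¬ (PySem.List.pyGetD s c 0 - al ≤ 5)) :
    ∀ (k : Nat) (r : Int), (c - r).toNat = k → 0 ≤ r → r ≤ c → solveWhile s n al r = c := by
  intro k
  induction k with
  | zero =>
    intro r hk h0 hrc
    have hrc' : r = c := by omega
    subst hrc'
    rw [solveWhile, dif_neg]
    rintro ⟨h1, h2⟩
    exact hhi h1 h2
  | succ k ih =>
    intro r hk h0 hrc
    have hrc' : r < c := by omega
    rw [solveWhile, dif_pos ⟨by omega, hlo r h0 hrc'⟩]
    exact ih (r + 1) (by omega) (by omega) (by omega)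

-- B's binary search converges to the same count c
theorem bsearch_eq (s : List Int) (n t c : Int)
    (hlo : ∀ i : Int, 0 ≤ i → i < c → PySem.List.pyGetD s i 0 ≤ t)
    (hhi : ∀ i : Int, c ≤ i → i < n → ¬ PySem.List.pyGetD s i 0 ≤ t) :
    ∀ (k : Nat) (lo hi : Int), (hi - lo).toNat ≤ k → 0 ≤ lo → lo ≤ c → c ≤ hi → hi ≤ n →
      bsearch s t lo hi = c := by
  intro k
  induction k with
  | zero =>
    intro lo hi hk h0 h1 h2 h3
    rw [bsearch, dif_neg (by omega : ¬ lo < hi)]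
    omega
  | succ k ih =>
    intro lo hi hk h0 h1 h2 h3
    by_cases hlh : lo < hi
    · have he : PySem.Int.floordiv (lo + hi) 2 = (lo + hi) / 2 :=
        PySem.Int.floordiv_eq_ediv_of_pos (by omega)
      rw [bsearch]
      simp only [dif_pos hlh]
      set mid := PySem.Int.floordiv (lo + hi) 2 with hmid
      by_cases hc : PySem.List.pyGetD s mid 0 ≤ t
      · rw [if_pos hc]
        have hmc : mid < c := by
          by_contra h
          exact hhi mid (by omega) (by omega) hc
        exact ih (mid + 1) hi (by omega) (by omega) (by omega) h2 h3
      · rw [if_neg hc]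
        have hcm : c ≤ mid := by
          by_contra h
          exact hc (hlo mid (by omega) (by omega))
        exact ih lo mid (by omega) h0 h1 hcm (by omega)
    · rw [bsearch, dif_neg hlh]
      omega

theorem pyGetD_take (s : List Int) (N : Nat) (i : Int) (h0 : 0 ≤ i) (hi : i < (N : Int))
    (hN : N ≤ s.length) :
    PySem.List.pyGetD (s.take N) i 0 = PySem.List.pyGetD s i 0 := by
  have hlen : (s.take N).length = N := by simp; omega
  have h1 : i < ((s.take N).length : Int) := by omega
  have h2 : i < (s.length : Int) := by omega
  rw [PySem.List.pyGetD_eq_getElem _ 0 h0 h1, PySem.List.pyGetD_eq_getElem _ 0 h0 h2]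
  simp [List.getElem_take]

-- bounds and interval facts for cntC at a valid left endpoint l
set_option maxRecDepth 8192 in
set_option maxHeartbeats 1000000 in
theorem cntC_facts (s : List Int) (n : Int) (hn : n ≤ (s.length : Int)) (h0n : 0 ≤ n)
    (hs : List.Pairwise (fun a b : Int => a ≤ b) s) (l : Int) (hl0 : 0 ≤ l) (hln : l < n) :
    (l < cntC s (s.take n.toNat) l ∧ cntC s (s.take n.toNat) l ≤ n) ∧
    (∀ r : Int, 0 ≤ r → r < cntC s (s.take n.toNat) l →
        PySem.List.pyGetD s r 0 - PySem.List.pyGetD s l 0 ≤ 5) ∧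
    (∀ i : Int, cntC s (s.take n.toNat) l ≤ i → i < n →
        ¬ (PySem.List.pyGetD s i 0 - PySem.List.pyGetD s l 0 ≤ 5)) := by
  set N := n.toNat with hNdef
  set p := s.take N with hpdef
  have hNs : N ≤ s.length := by omega
  have hplen : p.length = N := by simp [hpdef]; omega
  have hpp : List.Pairwise (fun a b : Int => a ≤ b) p := hs.sublist (List.take_sublist N s)
  set t := PySem.List.pyGetD s l 0 + 5 with htdef
  have hcle : p.countP (fun x => decide (x ≤ t)) ≤ N := hplen ▸ List.countP_le_length
  have hcval : cntC s p l = (p.countP (fun x => decide (x ≤ t)) : Int) := rfl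
  have hgl : PySem.List.pyGetD p l 0 = p[l.toNat] := by
    apply PySem.List.pyGetD_eq_getElem _ 0 hl0; omega
  rw [pyGetD_take s N l hl0 (by omega) hNs] at hgl
  have hlc : l < cntC s p l := by
    have hlN : l.toNat < p.length := by omega
    have hiff := countP_threshold p hpp t l.toNat hlN
    have hple0 : p[l.toNat] ≤ t := by
      rw [htdef, ← hgl]
      exact le_add_of_nonneg_right (by norm_num)
    have hlt := hiff.mp hple0
    omega
  refine ⟨⟨hlc, by omega⟩, ?_, ?_⟩
  · intro r hr0 hrc
    have hrN : r.toNat < p.length := by omega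
    have hiff := countP_threshold p hpp t r.toNat hrN
    have hple : p[r.toNat] ≤ t := hiff.mpr (by omega)
    have hg : PySem.List.pyGetD p r 0 = p[r.toNat] := by
      apply PySem.List.pyGetD_eq_getElem _ 0 hr0; omega
    rw [pyGetD_take s N r hr0 (by omega) hNs] at hg
    omega
  · intro i hci hin
    have hi0 : 0 ≤ i := by omega
    have hiN : i.toNat < p.length := by omega
    have hiff := countP_threshold p hpp t i.toNat hiN
    have hgt : ¬ (p[i.toNat] ≤ t) := by
      intro hle
      have := hiff.mp hle
      omega
    have hg : PySem.List.pyGetD p i 0 = p[i.toNat] := by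
      apply PySem.List.pyGetD_eq_getElem _ 0 hi0; omega
    rw [pyGetD_take s N i hi0 (by omega) hNs] at hg
    omega

theorem cntC_mono (s : List Int) (n : Int) (hn : n ≤ (s.length : Int))
    (hs : List.Pairwise (fun a b : Int => a ≤ b) s) (a b : Int)
    (h0 : 0 ≤ a) (hab : a ≤ b) (hb : b < n) :
    cntC s (s.take n.toNat) a ≤ cntC s (s.take n.toNat) b := by
  rcases eq_or_lt_of_le hab with h | h
  · subst h; exact le_refl _
  · have ha : PySem.List.pyGetD s a 0 = s[a.toNat] := by
      apply PySem.List.pyGetD_eq_getElem _ 0 h0; omega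
    have hb' : PySem.List.pyGetD s b 0 = s[b.toNat] := by
      apply PySem.List.pyGetD_eq_getElem _ 0 (by omega); omega
    have hmono : s[a.toNat] ≤ s[b.toNat] := by
      have := (List.pairwise_iff_getElem.mp hs) a.toNat b.toNat (by omega) (by omega) (by omega)
      exact this
    unfold cntC
    have : ∀ x ∈ s.take n.toNat, (fun x => decide (x ≤ PySem.List.pyGetD s a 0 + 5)) x = true →
        (fun x => decide (x ≤ PySem.List.pyGetD s b 0 + 5)) x = true := by
      intro x _ hx
      simp only [decide_eq_true_eq] at hx ⊢
      rw [ha] at hx; rw [hb']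
      omega
    exact_mod_cast List.countP_mono_left this

-- the two folds agree, carrying A's pointer invariant r ≤ cntC a
theorem fold_eq (s : List Int) (n : Int) (hn : n ≤ (s.length : Int)) (h0n : 0 ≤ n)
    (hs : List.Pairwise (fun a b : Int => a ≤ b) s) :
    ∀ (k : Nat) (a : Int), (n - a).toNat = k → 0 ≤ a →
      ∀ (res r : Int), (a < n → 0 ≤ r ∧ r ≤ cntC s (s.take n.toNat) a) →
      ((PySem.List.pyRange a n 1).foldl (fun (st : Int × Int) l =>
          let r' := solveWhile s n (PySem.List.pyGetD s l 0) st.2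
          (max st.1 (r' - l), r')) (res, r)).1
      = (PySem.List.pyRange a n 1).foldl (fun res l =>
          let lo := bsearch s (PySem.List.pyGetD s l 0 + 5) l n
          if lo - l > res then lo - l else res) res := by
  intro k
  induction k with
  | zero =>
    intro a hk h0 res r _
    rw [PySem.List.pyRange_one_eq_nil (by omega)]
    simp
  | succ k ih =>
    intro a hk h0 res r hinv
    have han : a < n := by omega
    obtain ⟨hr0, hrc⟩ := hinv han
    rw [PySem.List.pyRange_one_cons han]
    simp only [List.foldl_cons]
    obtain ⟨⟨hlc, hcn⟩, hlo, hhi⟩ := cntC_facts s n hn h0n hs a h0 han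
    set c := cntC s (s.take n.toNat) a with hcdef
    have hw : solveWhile s n (PySem.List.pyGetD s a 0) r = c :=
      while_eq s n (PySem.List.pyGetD s a 0) c hcn hlo
        (fun h => hhi c (le_refl c) h) (c - r).toNat r rfl hr0 hrc
    have hbs : bsearch s (PySem.List.pyGetD s a 0 + 5) a n = c :=
      bsearch_eq s n (PySem.List.pyGetD s a 0 + 5) c
        (fun i h1 h2 => by have := hlo i h1 h2; omega)
        (fun i h1 h2 => by have := hhi i h1 h2; omega)
        (n - a).toNat a n (by omega) h0 (by omega) hcn (le_refl n)
    have hres : (if bsearch s (PySem.List.pyGetD s a 0 + 5) a n - a > res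
          then bsearch s (PySem.List.pyGetD s a 0 + 5) a n - a else res)
        = max res (c - a) := by
      rw [hbs]; split <;> omega
    simp only [hw, hres]
    exact ih (a + 1) (by omega) (by omega) (max res (c - a)) c
      (fun h => ⟨by omega, cntC_mono s n hn hs a (a + 1) (by omega) (by omega) h⟩)

-- ===== VERDICT (by name: the statement is the Claim_ definition above) =====
theorem solve_spec : Claim_equal_solve := by
  intro n arr _ hpre
  unfold Spec_solve solve solve_alt
  have hpre' : n ≤ ((PySem.List.sorted arr (fun x => x) false).length : Int) := by
    rw [PySem.List.length_sorted]; exact hpre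
  set s := PySem.List.sorted arr (fun x => x) false with hsdef
  have hs : List.Pairwise (fun a b : Int => a ≤ b) s := by
    simpa using PySem.List.sorted_pairwise arr (fun x => x)
  by_cases h0n : 0 ≤ n
  · exact fold_eq s n hpre' h0n hs (n - 0).toNat 0 rfl (by omega) 0 0
      (fun h => ⟨le_refl 0, by
        have := (cntC_facts s n hpre' h0n hs 0 (le_refl 0) h).1.1
        omega⟩)
  · rw [PySem.List.pyRange_one_eq_nil (by omega)]
    simp
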